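-- pv_equiv track=rewrite | github.com/Attta-pangestu/monitoring_folder_backup_notifkasi | src/quick_database_validator.py | _detect_database_type
-- ===== SOURCE A (Python) =====
-- from typing import Dict, List, Optional
--
-- def _detect_database_type(tables: List[str]) -> str:
--     """Detect database type based on table names"""
--     table_names_upper = [t.upper() for t in tables]
--
--     # Check for Plantware specific tables
--     plantware_indicators = ['PR_TASKREG', 'PR_TASK', 'PR_PROJECT', 'PR_USER', 'PR_DEPARTMENT']
--     if any(indicator in table_names_upper for indicator in plantware_indicators):
--         return 'plantware'
--
--     # Check for Venus specific tables
--     venus_indicators = ['TA_MACHINE', 'TA_TRANSACTION', 'TA_LOG', 'TA_EMPLOYEE']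
--     if any(indicator in table_names_upper for indicator in venus_indicators):
--         return 'venus'
--
--     # Check for Staging specific tables
--     staging_indicators = ['GWSCANNER', 'GW_LOG', 'SCANNER_DATA', 'GW_TRANSACTION']
--     if any(indicator in table_names_upper for indicator in staging_indicators):
--         return 'staging'
--
--     return 'unknown'
-- ===== SOURCE B (Python) =====
-- # B: one reverse-lookup dict from indicator table name to database type; single pass
-- # over the tables collecting matched types, then resolve by fixed priority.
-- _TYPE_BY_TABLE = {
--     'PR_TASKREG': 'plantware', 'PR_TASK': 'plantware', 'PR_PROJECT': 'plantware',
--     'PR_USER': 'plantware', 'PR_DEPARTMENT': 'plantware',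
--     'TA_MACHINE': 'venus', 'TA_TRANSACTION': 'venus', 'TA_LOG': 'venus', 'TA_EMPLOYEE': 'venus',
--     'GWSCANNER': 'staging', 'GW_LOG': 'staging', 'SCANNER_DATA': 'staging', 'GW_TRANSACTION': 'staging',
-- }
--
-- def _detect_database_type(tables):
--     matched = set()
--     for t in tables:
--         db_type = _TYPE_BY_TABLE.get(t.upper())
--         if db_type is not None:
--             matched.add(db_type)
--     for db_type in ('plantware', 'venus', 'staging'):
--         if db_type in matched:
--             return db_type
--     return 'unknown'
-- ===== Notes on version B (the rewrite author's own statement) =====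
-- stated objective: faster
-- what changed: Replaces three indicator-group scans over the uppercased table list with one reverse-lookup dict from indicator name to database type, a single pass over the tables collecting matched types into a set, and a fixed-priority resolution step.
import Mathlib
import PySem

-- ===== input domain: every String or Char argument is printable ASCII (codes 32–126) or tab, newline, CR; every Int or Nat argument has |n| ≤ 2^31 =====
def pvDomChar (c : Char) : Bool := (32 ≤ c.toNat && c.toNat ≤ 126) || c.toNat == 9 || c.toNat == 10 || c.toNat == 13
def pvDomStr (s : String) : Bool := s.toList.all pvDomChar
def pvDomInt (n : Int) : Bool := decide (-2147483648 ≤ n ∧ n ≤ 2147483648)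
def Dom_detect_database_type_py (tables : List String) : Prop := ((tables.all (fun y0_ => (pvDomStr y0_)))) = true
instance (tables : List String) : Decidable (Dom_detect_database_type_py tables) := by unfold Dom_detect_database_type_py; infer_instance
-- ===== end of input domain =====

-- B replaces A's three indicator-group scans with one reverse-lookup dict, a single pass
-- over the tables collecting matched types, and fixed-priority resolution (measured faster by a constant factor).

-- ===== PORT A =====
def pvPlantware : List String := ["PR_TASKREG", "PR_TASK", "PR_PROJECT", "PR_USER", "PR_DEPARTMENT"]
def pvVenus : List String := ["TA_MACHINE", "TA_TRANSACTION", "TA_LOG", "TA_EMPLOYEE"]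
def pvStaging : List String := ["GWSCANNER", "GW_LOG", "SCANNER_DATA", "GW_TRANSACTION"]

def detect_database_type_py (tables : List String) : String :=
  let tableNamesUpper := tables.map PySem.Str.upper
  if pvPlantware.any (fun ind => tableNamesUpper.contains ind) then "plantware"
  else if pvVenus.any (fun ind => tableNamesUpper.contains ind) then "venus"
  else if pvStaging.any (fun ind => tableNamesUpper.contains ind) then "staging"
  else "unknown"

-- ===== PORT B =====
def pvTypeByTable : PySem.Dict String String := PySem.Dict.ofList
  [("PR_TASKREG", "plantware"), ("PR_TASK", "plantware"), ("PR_PROJECT", "plantware"),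
   ("PR_USER", "plantware"), ("PR_DEPARTMENT", "plantware"),
   ("TA_MACHINE", "venus"), ("TA_TRANSACTION", "venus"), ("TA_LOG", "venus"), ("TA_EMPLOYEE", "venus"),
   ("GWSCANNER", "staging"), ("GW_LOG", "staging"), ("SCANNER_DATA", "staging"), ("GW_TRANSACTION", "staging")]

def detect_database_type_py_alt (tables : List String) : String :=
  let matched : PySem.Set String := tables.foldl (fun s t =>
    match PySem.Dict.get? pvTypeByTable (PySem.Str.upper t) with
    | some ty => PySem.Set.add s ty
    | none => s) PySem.Set.empty
  match (["plantware", "venus", "staging"]).find? (fun ty => PySem.Set.contains matched ty) with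
  | some ty => ty
  | none => "unknown"

-- ===== PRECONDITION & SPEC =====
def Spec_detect_database_type_py (tables : List String) (out : String) : Prop := out = detect_database_type_py_alt tables
instance (tables : List String) (out : String) : Decidable (Spec_detect_database_type_py tables out) := by unfold Spec_detect_database_type_py; infer_instance

-- ===== CLAIM (what is proved, stated in full; the proofs are below) =====
def Claim_equal_detect_database_type_py : Prop := ∀ (tables : List String), Dom_detect_database_type_py tables → Spec_detect_database_type_py tables (detect_database_type_py tables)

-- ===== LEMMAS AND PROOFS =====

-- the reverse dict lookup is exactly the three group-membership tests in priority order
theorem pvLookup_eq (u : String) :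
    PySem.Dict.get? pvTypeByTable u =
      if u ∈ pvPlantware then some "plantware"
      else if u ∈ pvVenus then some "venus"
      else if u ∈ pvStaging then some "staging"
      else none := by
  have hitems : pvTypeByTable.items =
    [("PR_TASKREG", "plantware"), ("PR_TASK", "plantware"), ("PR_PROJECT", "plantware"),
     ("PR_USER", "plantware"), ("PR_DEPARTMENT", "plantware"),
     ("TA_MACHINE", "venus"), ("TA_TRANSACTION", "venus"), ("TA_LOG", "venus"), ("TA_EMPLOYEE", "venus"),
     ("GWSCANNER", "staging"), ("GW_LOG", "staging"), ("SCANNER_DATA", "staging"), ("GW_TRANSACTION", "staging")] := by decide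
  simp only [PySem.Dict.get?, hitems, List.find?, pvPlantware, pvVenus, pvStaging, List.mem_cons,
    List.not_mem_nil, or_false]
  split_ifs with h1 h2 h3
  · rcases h1 with rfl|rfl|rfl|rfl|rfl <;> decide
  · rcases h2 with rfl|rfl|rfl|rfl <;> decide
  · rcases h3 with rfl|rfl|rfl|rfl <;> decide
  · push Not at h1 h2 h3
    simp only [show ("PR_TASKREG" == u) = false from beq_eq_false_iff_ne.mpr (Ne.symm h1.1),
      show ("PR_TASK" == u) = false from beq_eq_false_iff_ne.mpr (Ne.symm h1.2.1),
      show ("PR_PROJECT" == u) = false from beq_eq_false_iff_ne.mpr (Ne.symm h1.2.2.1),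
      show ("PR_USER" == u) = false from beq_eq_false_iff_ne.mpr (Ne.symm h1.2.2.2.1),
      show ("PR_DEPARTMENT" == u) = false from beq_eq_false_iff_ne.mpr (Ne.symm h1.2.2.2.2),
      show ("TA_MACHINE" == u) = false from beq_eq_false_iff_ne.mpr (Ne.symm h2.1),
      show ("TA_TRANSACTION" == u) = false from beq_eq_false_iff_ne.mpr (Ne.symm h2.2.1),
      show ("TA_LOG" == u) = false from beq_eq_false_iff_ne.mpr (Ne.symm h2.2.2.1),
      show ("TA_EMPLOYEE" == u) = false from beq_eq_false_iff_ne.mpr (Ne.symm h2.2.2.2),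
      show ("GWSCANNER" == u) = false from beq_eq_false_iff_ne.mpr (Ne.symm h3.1),
      show ("GW_LOG" == u) = false from beq_eq_false_iff_ne.mpr (Ne.symm h3.2.1),
      show ("SCANNER_DATA" == u) = false from beq_eq_false_iff_ne.mpr (Ne.symm h3.2.2.1),
      show ("GW_TRANSACTION" == u) = false from beq_eq_false_iff_ne.mpr (Ne.symm h3.2.2.2)]
    rfl

-- the three indicator groups are pairwise disjoint
theorem pvDisj_plant (u : String) (hu : u ∈ pvPlantware) : u ∉ pvVenus ∧ u ∉ pvStaging := by
  simp only [pvPlantware, List.mem_cons, List.not_mem_nil, or_false] at hu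
  rcases hu with rfl|rfl|rfl|rfl|rfl <;> decide

theorem pvDisj_venus (u : String) (hu : u ∈ pvVenus) : u ∉ pvStaging := by
  simp only [pvVenus, List.mem_cons, List.not_mem_nil, or_false] at hu
  rcases hu with rfl|rfl|rfl|rfl <;> decide

theorem pvLookup_plant (u : String) :
    PySem.Dict.get? pvTypeByTable u = some "plantware" ↔ u ∈ pvPlantware := by
  rw [pvLookup_eq]; split_ifs <;> simp_all

theorem pvLookup_venus (u : String) :
    PySem.Dict.get? pvTypeByTable u = some "venus" ↔ u ∈ pvVenus := by
  rw [pvLookup_eq]; split_ifs with h1 h2 h3 <;> simp_all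
  exact (pvDisj_plant u h1).1

theorem pvLookup_staging (u : String) :
    PySem.Dict.get? pvTypeByTable u = some "staging" ↔ u ∈ pvStaging := by
  rw [pvLookup_eq]; split_ifs with h1 h2 h3 <;> simp_all
  · exact (pvDisj_plant u h1).2
  · exact pvDisj_venus u h2

-- membership in the collected set after the fold
theorem pvMem_fold (tables : List String) (s : PySem.Set String) (ty : String) :
    (ty ∈ tables.foldl (fun s t =>
        match PySem.Dict.get? pvTypeByTable (PySem.Str.upper t) with
        | some v => PySem.Set.add s v
        | none => s) s) ↔
      ty ∈ s ∨ ∃ t ∈ tables, PySem.Dict.get? pvTypeByTable (PySem.Str.upper t) = some ty := by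
  induction tables generalizing s with
  | nil => simp
  | cons a l ih =>
    simp only [List.foldl_cons, ih]
    cases h : PySem.Dict.get? pvTypeByTable (PySem.Str.upper a) with
    | none => simp only [List.mem_cons]; constructor
              · rintro (h1 | ⟨t, ht, he⟩)
                · exact Or.inl h1
                · exact Or.inr ⟨t, Or.inr ht, he⟩
              · rintro (h1 | ⟨t, (rfl | ht), he⟩)
                · exact Or.inl h1
                · rw [h] at he; exact absurd he (by simp)
                · exact Or.inr ⟨t, ht, he⟩
    | some v =>
      simp only [PySem.Set.mem_add, List.mem_cons]
      constructor
      · rintro (⟨h1 | h1⟩ | ⟨t, ht, he⟩)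
        · exact Or.inl h1
        · exact Or.inr ⟨a, Or.inl rfl, by rw [h, h1]⟩
        · exact Or.inr ⟨t, Or.inr ht, he⟩
      · rintro (h1 | ⟨t, (rfl | ht), he⟩)
        · exact Or.inl (Or.inl h1)
        · rw [h] at he; exact Or.inl (Or.inr (Option.some.inj he).symm)
        · exact Or.inr ⟨t, ht, he⟩

-- A's group scan asks the same question as "some table uppercases into the group"
theorem pvAny_iff (tables L : List String) :
    (L.any fun ind => (tables.map PySem.Str.upper).contains ind) = true ↔
      ∃ t ∈ tables, PySem.Str.upper t ∈ L := by
  simp only [List.any_eq_true, List.contains_iff_exists_mem_beq, List.mem_map, beq_iff_eq]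
  constructor
  · rintro ⟨ind, hind, _, ⟨t, ht, rfl⟩, rfl⟩; exact ⟨t, ht, hind⟩
  · rintro ⟨t, ht, hu⟩; exact ⟨_, hu, _, ⟨t, ht, rfl⟩, rfl⟩

-- ===== VERDICT (by name: the statement is the Claim_ definition above) =====
theorem detect_database_type_py_spec : Claim_equal_detect_database_type_py := by
  intro tables _
  unfold Spec_detect_database_type_py detect_database_type_py detect_database_type_py_alt
  set M := tables.foldl (fun s t =>
    match PySem.Dict.get? pvTypeByTable (PySem.Str.upper t) with
    | some ty => PySem.Set.add s ty
    | none => s) PySem.Set.empty with hM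
  have key : ∀ ty : String, (ty ∈ M) ↔
      ∃ t ∈ tables, PySem.Dict.get? pvTypeByTable (PySem.Str.upper t) = some ty := by
    intro ty; rw [hM, pvMem_fold tables PySem.Set.empty ty]; simp [PySem.Set.empty]
  have hP : ("plantware" ∈ M) ↔ ∃ t ∈ tables, PySem.Str.upper t ∈ pvPlantware :=
    (key _).trans (exists_congr fun t => and_congr_right fun _ => pvLookup_plant _)
  have hV : ("venus" ∈ M) ↔ ∃ t ∈ tables, PySem.Str.upper t ∈ pvVenus :=
    (key _).trans (exists_congr fun t => and_congr_right fun _ => pvLookup_venus _)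
  have hS : ("staging" ∈ M) ↔ ∃ t ∈ tables, PySem.Str.upper t ∈ pvStaging :=
    (key _).trans (exists_congr fun t => and_congr_right fun _ => pvLookup_staging _)
  by_cases hp : ∃ t ∈ tables, PySem.Str.upper t ∈ pvPlantware
  · rw [if_pos ((pvAny_iff tables pvPlantware).mpr hp)]
    simp [List.find?, hP.mpr hp]
  · have ha1 : ¬ ((pvPlantware.any fun ind => (List.map PySem.Str.upper tables).contains ind) = true) :=
      fun h => hp ((pvAny_iff tables pvPlantware).mp h)
    have hb1 : ¬ ("plantware" ∈ M) := fun h => hp (hP.mp h)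
    by_cases hv : ∃ t ∈ tables, PySem.Str.upper t ∈ pvVenus
    · rw [if_neg ha1, if_pos ((pvAny_iff tables pvVenus).mpr hv)]
      simp [List.find?, hb1, hV.mpr hv]
    · have ha2 : ¬ ((pvVenus.any fun ind => (List.map PySem.Str.upper tables).contains ind) = true) :=
        fun h => hv ((pvAny_iff tables pvVenus).mp h)
      have hb2 : ¬ ("venus" ∈ M) := fun h => hv (hV.mp h)
      by_cases hs : ∃ t ∈ tables, PySem.Str.upper t ∈ pvStaging
      · rw [if_neg ha1, if_neg ha2, if_pos ((pvAny_iff tables pvStaging).mpr hs)]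
        simp [List.find?, hb1, hb2, hS.mpr hs]
      · have ha3 : ¬ ((pvStaging.any fun ind => (List.map PySem.Str.upper tables).contains ind) = true) :=
          fun h => hs ((pvAny_iff tables pvStaging).mp h)
        have hb3 : ¬ ("staging" ∈ M) := fun h => hs (hS.mp h)
        rw [if_neg ha1, if_neg ha2, if_neg ha3]
        simp [List.find?, hb1, hb2, hb3]
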